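-- pv_equiv track=rewrite | github.com/thegrenadinekid25/neume-ml | src/data_generation/voicing/bass_note.py | get_inversion_interval
-- ===== SOURCE A (Python) =====
-- from typing import List
--
-- def get_inversion_interval(chord_intervals: List[int], inversion_type: str) -> int:
--     """
--     Get the interval for a given inversion type from the chord intervals.
--
--     Args:
--         chord_intervals: List of intervals in semitones from the root (e.g., [0, 4, 7] for major triad)
--         inversion_type: Type of inversion ("root", "first_inv", "second_inv", "third_inv")
--
--     Returns:
--         The interval in semitones for the specified inversion type
--
--     Raises:
--         ValueError: If the inversion type is not valid or the chord doesn't have the required interval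
--     """
--     if inversion_type == "root":
--         return 0
--
--     elif inversion_type == "first_inv":
--         # Find the third (intervals 3 or 4)
--         for interval in chord_intervals:
--             if interval in (3, 4):
--                 return interval
--         raise ValueError(f"No third found in chord intervals: {chord_intervals}")
--
--     elif inversion_type == "second_inv":
--         # Find the fifth (intervals 6, 7, or 8)
--         for interval in chord_intervals:
--             if interval in (6, 7, 8):
--                 return interval
--         raise ValueError(f"No fifth found in chord intervals: {chord_intervals}")
--
--     elif inversion_type == "third_inv":
--         # Find the seventh (intervals 9, 10, or 11)
--         for interval in chord_intervals:
--             if interval in (9, 10, 11):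
--                 return interval
--         raise ValueError(f"No seventh found in chord intervals: {chord_intervals}")
--
--     else:
--         raise ValueError(f"Unknown inversion type: {inversion_type}")
-- ===== SOURCE B (Python) =====
-- _QUALITY = {3: "third", 4: "third",
--             6: "fifth", 7: "fifth", 8: "fifth",
--             9: "seventh", 10: "seventh", 11: "seventh"}
--
-- _WANTED = {"first_inv": "third", "second_inv": "fifth", "third_inv": "seventh"}
--
--
-- def get_inversion_interval(chord_intervals, inversion_type):
--     if inversion_type == "root":
--         return 0
--     if inversion_type not in _WANTED:
--         raise ValueError(f"Unknown inversion type: {inversion_type}")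
--     # One classification pass: record the FIRST interval of each quality.
--     firsts = {}
--     for interval in chord_intervals:
--         quality = _QUALITY.get(interval)
--         if quality is not None and quality not in firsts:
--             firsts[quality] = interval
--     label = _WANTED[inversion_type]
--     if label in firsts:
--         return firsts[label]
--     raise ValueError(f"No {label} found in chord intervals: {chord_intervals}")
-- ===== Notes on version B (the rewrite author's own statement) =====
-- stated objective: alternative
-- what changed: Instead of A's per-inversion-type membership scan, B makes one target-agnostic classification pass that indexes the first interval of every quality (third/fifth/seventh) into a dict and then answers by a single lookup of the requested quality.
import Mathlib
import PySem

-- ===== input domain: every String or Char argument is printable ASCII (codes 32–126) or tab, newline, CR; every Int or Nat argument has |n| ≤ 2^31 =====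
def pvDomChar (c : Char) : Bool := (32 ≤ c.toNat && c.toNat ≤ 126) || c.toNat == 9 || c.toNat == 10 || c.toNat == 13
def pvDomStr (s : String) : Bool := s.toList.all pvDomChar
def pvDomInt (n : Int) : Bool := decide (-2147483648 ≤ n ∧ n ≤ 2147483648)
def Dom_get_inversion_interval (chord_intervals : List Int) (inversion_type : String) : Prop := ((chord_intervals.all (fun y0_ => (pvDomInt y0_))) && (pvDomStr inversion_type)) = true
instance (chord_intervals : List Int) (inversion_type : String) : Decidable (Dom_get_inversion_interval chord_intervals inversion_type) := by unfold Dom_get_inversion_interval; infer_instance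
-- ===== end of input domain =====

-- B replaces A's per-inversion-type membership scans by one target-agnostic classification
-- pass that indexes the first interval of every quality into a dict, then answers by lookup
-- (alternative decomposition, same cost). Where the Python raises ValueError, both ports
-- return 0; those inputs are outside Pre_.

-- ===== PORT A =====
-- A's loop "for interval in chord_intervals: if interval in (3, 4): return interval" (raise → 0)
def pvLoopThird (xs : List Int) : Int :=
  match xs with
  | [] => 0
  | x :: rest => if x = 3 ∨ x = 4 then x else pvLoopThird rest

-- A's loop for the fifth: membership in (6, 7, 8)
def pvLoopFifth (xs : List Int) : Int :=
  match xs with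
  | [] => 0
  | x :: rest => if x = 6 ∨ x = 7 ∨ x = 8 then x else pvLoopFifth rest

-- A's loop for the seventh: membership in (9, 10, 11)
def pvLoopSeventh (xs : List Int) : Int :=
  match xs with
  | [] => 0
  | x :: rest => if x = 9 ∨ x = 10 ∨ x = 11 then x else pvLoopSeventh rest

def get_inversion_interval (chord_intervals : List Int) (inversion_type : String) : Int :=
  if inversion_type = "root" then 0
  else if inversion_type = "first_inv" then pvLoopThird chord_intervals
  else if inversion_type = "second_inv" then pvLoopFifth chord_intervals
  else if inversion_type = "third_inv" then pvLoopSeventh chord_intervals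
  else 0  -- ValueError in Python; outside Pre_

-- ===== PORT B =====
-- B's module-level table _QUALITY: interval ↦ quality name
def pvQualityTable : PySem.Dict Int String :=
  PySem.Dict.ofList [(3, "third"), (4, "third"),
                     (6, "fifth"), (7, "fifth"), (8, "fifth"),
                     (9, "seventh"), (10, "seventh"), (11, "seventh")]

-- B's module-level table _WANTED: inversion type ↦ quality name
def pvWantedTable : PySem.Dict String String :=
  PySem.Dict.ofList [("first_inv", "third"), ("second_inv", "fifth"), ("third_inv", "seventh")]

-- B's loop body: record the FIRST interval of each quality ("if quality is not None and quality not in firsts")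
def pvStep (d : PySem.Dict String Int) (x : Int) : PySem.Dict String Int :=
  match PySem.Dict.get? pvQualityTable x with
  | none => d
  | some q => if d.contains q then d else d.insert q x

-- B's classification pass: firsts = {}; for interval in chord_intervals: …
def pvBuildFirsts (xs : List Int) : PySem.Dict String Int :=
  xs.foldl pvStep PySem.Dict.empty

def get_inversion_interval_alt (chord_intervals : List Int) (inversion_type : String) : Int :=
  if inversion_type = "root" then 0
  else
    match PySem.Dict.get? pvWantedTable inversion_type with
    | none => 0  -- ValueError in Python; outside Pre_
    | some label =>
        match PySem.Dict.get? (pvBuildFirsts chord_intervals) label with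
        | some v => v
        | none => 0  -- ValueError in Python; outside Pre_

-- ===== PRECONDITION & SPEC =====
-- Pre_ admits exactly the inputs on which Python A returns (elsewhere it raises ValueError).
def Pre_get_inversion_interval (chord_intervals : List Int) (inversion_type : String) : Prop :=
  inversion_type = "root" ∨
  (inversion_type = "first_inv" ∧ ∃ x ∈ chord_intervals, x = 3 ∨ x = 4) ∨
  (inversion_type = "second_inv" ∧ ∃ x ∈ chord_intervals, x = 6 ∨ x = 7 ∨ x = 8) ∨
  (inversion_type = "third_inv" ∧ ∃ x ∈ chord_intervals, x = 9 ∨ x = 10 ∨ x = 11)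
instance (chord_intervals : List Int) (inversion_type : String) : Decidable (Pre_get_inversion_interval chord_intervals inversion_type) := by unfold Pre_get_inversion_interval; infer_instance

def pvWitness_get_inversion_interval : List Int × String := ([0, 4, 7], "first_inv")

def Spec_get_inversion_interval (chord_intervals : List Int) (inversion_type : String) (out : Int) : Prop := out = get_inversion_interval_alt chord_intervals inversion_type
instance (chord_intervals : List Int) (inversion_type : String) (out : Int) : Decidable (Spec_get_inversion_interval chord_intervals inversion_type out) := by unfold Spec_get_inversion_interval; infer_instance

-- ===== CLAIM =====
def Claim_equal_get_inversion_interval : Prop := ∀ (chord_intervals : List Int) (inversion_type : String), Dom_get_inversion_interval chord_intervals inversion_type → Pre_get_inversion_interval chord_intervals inversion_type → Spec_get_inversion_interval chord_intervals inversion_type (get_inversion_interval chord_intervals inversion_type)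

-- ===== LEMMAS AND PROOFS =====
-- Proof-side characterisation of B's pass: the first element of xs whose quality is L
def pvFirstQ (L : String) (xs : List Int) : Option Int :=
  match xs with
  | [] => none
  | x :: rest => if PySem.Dict.get? pvQualityTable x = some L then some x else pvFirstQ L rest

theorem pvFirstQ_cons (L : String) (x : Int) (rest : List Int) :
    pvFirstQ L (x :: rest) =
      if PySem.Dict.get? pvQualityTable x = some L then some x else pvFirstQ L rest := rfl

-- closed form of the _QUALITY table lookup
theorem pvQ (x : Int) : PySem.Dict.get? pvQualityTable x =
    (if x = 3 ∨ x = 4 then some "third"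
     else if x = 6 ∨ x = 7 ∨ x = 8 then some "fifth"
     else if x = 9 ∨ x = 10 ∨ x = 11 then some "seventh"
     else none) := by
  by_cases h3 : x = 3; · subst h3; decide
  by_cases h4 : x = 4; · subst h4; decide
  by_cases h6 : x = 6; · subst h6; decide
  by_cases h7 : x = 7; · subst h7; decide
  by_cases h8 : x = 8; · subst h8; decide
  by_cases h9 : x = 9; · subst h9; decide
  by_cases h10 : x = 10; · subst h10; decide
  by_cases h11 : x = 11; · subst h11; decide
  have hn : PySem.Dict.get? pvQualityTable x = none := by
    rw [PySem.Dict.get?_eq_none_iff_not_mem_keys]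
    have hk : pvQualityTable.keys = [3, 4, 6, 7, 8, 9, 10, 11] := by decide
    rw [hk]; simp_all
  rw [hn]; simp_all

theorem pvQ_third (x : Int) :
    (PySem.Dict.get? pvQualityTable x = some "third") ↔ (x = 3 ∨ x = 4) := by
  rw [pvQ]; split_ifs <;> (try simp_all) <;> omega

theorem pvQ_fifth (x : Int) :
    (PySem.Dict.get? pvQualityTable x = some "fifth") ↔ (x = 6 ∨ x = 7 ∨ x = 8) := by
  rw [pvQ]; split_ifs <;> (try simp_all) <;> omega

theorem pvQ_seventh (x : Int) :
    (PySem.Dict.get? pvQualityTable x = some "seventh") ↔ (x = 9 ∨ x = 10 ∨ x = 11) := by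
  rw [pvQ]; split_ifs <;> (try simp_all) <;> omega

-- B's fold, run from any starting dict, never overwrites: its lookup is the first match
theorem pvBuild_get (L : String) (xs : List Int) :
    ∀ d : PySem.Dict String Int,
      (xs.foldl pvStep d).get? L = (d.get? L).or (pvFirstQ L xs) := by
  induction xs with
  | nil => intro d; simp [pvFirstQ]
  | cons x rest ih =>
    intro d
    rw [List.foldl_cons, ih, pvFirstQ_cons]
    unfold pvStep
    cases hq : PySem.Dict.get? pvQualityTable x with
    | none => simp
    | some q =>
      by_cases hL : q = L
      · subst hL
        simp only [if_pos rfl]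
        by_cases hc : d.contains q
        · rcases Option.isSome_iff_exists.mp
            (by rw [← PySem.Dict.contains_eq_isSome_get? d q]; exact hc) with ⟨v, hv⟩
          simp [hc, hv]
        · have hn : d.get? q = none := by
            cases h : d.get? q with
            | none => rfl
            | some v =>
              exact absurd (by rw [PySem.Dict.contains_eq_isSome_get?, h]; rfl) hc
          simp [hc, hn, PySem.Dict.get?_insert_self]
      · have hne : (some q : Option String) = some L ↔ False := by simp [hL]
        simp only [hne, if_false]
        by_cases hc : d.contains q
        · simp [hc]
        · have : (d.insert q x).get? L = d.get? L :=
            PySem.Dict.get?_insert_of_ne d x (fun h => hL h.symm)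
          simp [hc, this]

theorem pvBuildFirsts_get (L : String) (xs : List Int) :
    (pvBuildFirsts xs).get? L = pvFirstQ L xs := by
  unfold pvBuildFirsts
  rw [pvBuild_get]
  simp [PySem.Dict.get?_empty]

theorem pvLoopThird_eq (xs : List Int) :
    pvLoopThird xs = (pvFirstQ "third" xs).getD 0 := by
  induction xs with
  | nil => rfl
  | cons x rest ih =>
    show (if x = 3 ∨ x = 4 then x else pvLoopThird rest) = _
    rw [pvFirstQ_cons]
    by_cases h : x = 3 ∨ x = 4
    · simp [h, (pvQ_third x).mpr h]
    · have hq : ¬ PySem.Dict.get? pvQualityTable x = some "third" :=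
        fun hc => h ((pvQ_third x).mp hc)
      rw [if_neg h, if_neg hq, ih]

theorem pvLoopFifth_eq (xs : List Int) :
    pvLoopFifth xs = (pvFirstQ "fifth" xs).getD 0 := by
  induction xs with
  | nil => rfl
  | cons x rest ih =>
    show (if x = 6 ∨ x = 7 ∨ x = 8 then x else pvLoopFifth rest) = _
    rw [pvFirstQ_cons]
    by_cases h : x = 6 ∨ x = 7 ∨ x = 8
    · simp [h, (pvQ_fifth x).mpr h]
    · have hq : ¬ PySem.Dict.get? pvQualityTable x = some "fifth" :=
        fun hc => h ((pvQ_fifth x).mp hc)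
      rw [if_neg h, if_neg hq, ih]

theorem pvLoopSeventh_eq (xs : List Int) :
    pvLoopSeventh xs = (pvFirstQ "seventh" xs).getD 0 := by
  induction xs with
  | nil => rfl
  | cons x rest ih =>
    show (if x = 9 ∨ x = 10 ∨ x = 11 then x else pvLoopSeventh rest) = _
    rw [pvFirstQ_cons]
    by_cases h : x = 9 ∨ x = 10 ∨ x = 11
    · simp [h, (pvQ_seventh x).mpr h]
    · have hq : ¬ PySem.Dict.get? pvQualityTable x = some "seventh" :=
        fun hc => h ((pvQ_seventh x).mp hc)
      rw [if_neg h, if_neg hq, ih]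

theorem pvFirstQ_eq_none (L : String) (xs : List Int) (h : pvFirstQ L xs = none) :
    ∀ x ∈ xs, ¬ PySem.Dict.get? pvQualityTable x = some L := by
  induction xs with
  | nil => simp
  | cons y rest ih =>
    rw [pvFirstQ_cons] at h
    intro x hx
    by_cases hq : PySem.Dict.get? pvQualityTable y = some L
    · simp [hq] at h
    · rcases List.mem_cons.mp hx with rfl | hx
      · exact hq
      · exact ih (by simpa [hq] using h) x hx

-- ===== VERDICT =====
theorem get_inversion_interval_spec : Claim_equal_get_inversion_interval := by
  intro ci t _ hpre
  unfold Spec_get_inversion_interval get_inversion_interval get_inversion_interval_alt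
  rcases hpre with h | ⟨h, hx⟩ | ⟨h, hx⟩ | ⟨h, hx⟩ <;> subst h
  · rfl
  · have hw : PySem.Dict.get? pvWantedTable "first_inv" = some "third" := rfl
    simp only [if_neg (by decide : ¬("first_inv" : String) = "root"),
      hw,
      pvBuildFirsts_get, pvLoopThird_eq]
    cases hv : pvFirstQ "third" ci with
    | some v => simp
    | none =>
      rcases hx with ⟨x, hmem, hx⟩
      exact absurd ((pvQ_third x).mpr hx) (pvFirstQ_eq_none _ _ hv x hmem)
  · have hw : PySem.Dict.get? pvWantedTable "second_inv" = some "fifth" := rfl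
    simp only [if_neg (by decide : ¬("second_inv" : String) = "root"),
      if_neg (by decide : ¬("second_inv" : String) = "first_inv"),
      hw,
      pvBuildFirsts_get, pvLoopFifth_eq]
    cases hv : pvFirstQ "fifth" ci with
    | some v => simp
    | none =>
      rcases hx with ⟨x, hmem, hx⟩
      exact absurd ((pvQ_fifth x).mpr hx) (pvFirstQ_eq_none _ _ hv x hmem)
  · have hw : PySem.Dict.get? pvWantedTable "third_inv" = some "seventh" := rfl
    simp only [if_neg (by decide : ¬("third_inv" : String) = "root"),
      if_neg (by decide : ¬("third_inv" : String) = "first_inv"),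
      if_neg (by decide : ¬("third_inv" : String) = "second_inv"),
      hw,
      pvBuildFirsts_get, pvLoopSeventh_eq]
    cases hv : pvFirstQ "seventh" ci with
    | some v => simp
    | none =>
      rcases hx with ⟨x, hmem, hx⟩
      exact absurd ((pvQ_seventh x).mpr hx) (pvFirstQ_eq_none _ _ hv x hmem)
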